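-- pv_equiv track=rewrite | github.com/MaastrichtU-IDS/semanticscience | trunk/tools/MolSurfGenService/MolSurfaceGen32/chimera/share/VolumePath/stitch.py | all_open_or_closed
-- ===== SOURCE A (Python) =====
-- def all_open_or_closed(clist):
--
--   opened = closed = 0
--   for c in clist:
--     if len(c) > 1:
--       if c[-1] == c[0]:
--         closed += 1
--       else:
--         opened += 1
--       if opened > 0 and closed > 0:
--         return False
--   return True
-- ===== SOURCE B (Python) =====
-- def all_open_or_closed(clist):
--   for i, c in enumerate(clist):
--     if len(c) > 1:
--       ref = c[-1] == c[0]
--       return all((d[-1] == d[0]) == ref for d in clist[i+1:] if len(d) > 1)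
--   return True
-- ===== Notes on version B (the rewrite author's own statement) =====
-- stated objective: alternative
-- what changed: Replaces A's two running counters (opened/closed) and mid-loop early exit with a two-phase reference check: find the first curve with more than one point, take its closed-ness as the reference, and verify every later qualifying curve matches that reference with all().
import Mathlib
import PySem

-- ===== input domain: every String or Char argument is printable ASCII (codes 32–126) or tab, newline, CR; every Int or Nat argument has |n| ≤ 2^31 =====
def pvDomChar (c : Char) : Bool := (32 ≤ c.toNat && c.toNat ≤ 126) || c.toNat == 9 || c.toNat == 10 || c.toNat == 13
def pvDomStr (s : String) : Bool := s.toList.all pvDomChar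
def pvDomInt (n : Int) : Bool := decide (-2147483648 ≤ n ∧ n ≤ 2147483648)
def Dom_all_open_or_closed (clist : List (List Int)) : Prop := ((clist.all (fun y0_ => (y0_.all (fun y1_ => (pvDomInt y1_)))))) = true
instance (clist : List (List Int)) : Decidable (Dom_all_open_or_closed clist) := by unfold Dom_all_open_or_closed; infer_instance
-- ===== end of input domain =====

-- B replaces A's two running counters and mid-loop early exit with a two-phase
-- reference check: find the first curve with >1 points, take its closed-ness as
-- the reference, and verify all later qualifying curves match it (objective: alternative).

-- ===== PORT A =====
def aopLoop : List (List Int) → Int → Int → Bool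
  | [], _, _ => true
  | c :: rest, opened, closed =>
    if c.length > 1 then
      let opened' : Int := if PySem.List.pyGet? c (-1) = PySem.List.pyGet? c 0 then opened else opened + 1
      let closed' : Int := if PySem.List.pyGet? c (-1) = PySem.List.pyGet? c 0 then closed + 1 else closed
      if 0 < opened' ∧ 0 < closed' then false
      else aopLoop rest opened' closed'
    else aopLoop rest opened closed

def all_open_or_closed (clist : List (List Int)) : Bool := aopLoop clist 0 0

-- ===== PORT B =====
-- recursion over the list: the tail `rest` at position i is exactly clist[i+1:]
def bGo : List (List Int) → Bool
  | [] => true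
  | c :: rest =>
    if c.length > 1 then
      let ref : Bool := decide (PySem.List.pyGet? c (-1) = PySem.List.pyGet? c 0)
      rest.all (fun d =>
        !(decide (d.length > 1)) ||
          (decide (PySem.List.pyGet? d (-1) = PySem.List.pyGet? d 0) == ref))
    else bGo rest

def all_open_or_closed_alt (clist : List (List Int)) : Bool := bGo clist

-- ===== PRECONDITION & SPEC =====
def Spec_all_open_or_closed (clist : List (List Int)) (out : Bool) : Prop := out = all_open_or_closed_alt clist
instance (clist : List (List Int)) (out : Bool) : Decidable (Spec_all_open_or_closed clist out) := by unfold Spec_all_open_or_closed; infer_instance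

-- ===== CLAIM (what is proved, stated in full; the proofs are below) =====
def Claim_equal_all_open_or_closed : Prop := ∀ (clist : List (List Int)), Dom_all_open_or_closed clist → Spec_all_open_or_closed clist (all_open_or_closed clist)

-- ===== LEMMAS AND PROOFS =====
-- the list of closed-ness flags of the curves with more than one point
def flagsOf (clist : List (List Int)) : List Bool :=
  (clist.filter (fun c => decide (c.length > 1))).map
    (fun c => decide (PySem.List.pyGet? c (-1) = PySem.List.pyGet? c 0))

lemma flagsOf_cons (c : List Int) (rest : List (List Int)) : flagsOf (c :: rest) =
    if c.length > 1 then
      decide (PySem.List.pyGet? c (-1) = PySem.List.pyGet? c 0) :: flagsOf rest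
    else flagsOf rest := by
  simp [flagsOf, List.filter_cons]
  split <;> simp_all

lemma aopLoop_eq (clist : List (List Int)) : ∀ (opened closed : Int),
    0 ≤ opened → 0 ≤ closed → ¬(0 < opened ∧ 0 < closed) →
    (aopLoop clist opened closed = true ↔
      ¬((0 < opened ∨ false ∈ flagsOf clist) ∧ (0 < closed ∨ true ∈ flagsOf clist))) := by
  induction clist with
  | nil => intro opened closed _ _ h; simp [aopLoop, flagsOf]; omega
  | cons c rest ih =>
    intro opened closed ho hc hnot
    rw [flagsOf_cons]
    by_cases hlen : c.length > 1
    · rw [if_pos hlen]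
      by_cases hfl : PySem.List.pyGet? c (-1) = PySem.List.pyGet? c 0
      · simp only [aopLoop, if_pos hlen, hfl, decide_true, if_true]
        by_cases hstop : 0 < opened ∧ 0 < (closed + 1)
        · rw [if_pos hstop]
          by_cases hP : false ∈ flagsOf rest <;> by_cases hQ : true ∈ flagsOf rest <;>
            simp [hP, hQ] <;> omega
        · rw [if_neg hstop, ih opened (closed + 1) ho (by omega) hstop]
          by_cases hP : false ∈ flagsOf rest <;> by_cases hQ : true ∈ flagsOf rest <;>
            simp [hP, hQ] <;> omega
      · simp only [aopLoop, if_pos hlen, hfl, decide_false, if_false]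
        by_cases hstop : 0 < (opened + 1) ∧ 0 < closed
        · rw [if_pos hstop]
          by_cases hP : false ∈ flagsOf rest <;> by_cases hQ : true ∈ flagsOf rest <;>
            simp [hP, hQ] <;> omega
        · rw [if_neg hstop, ih (opened + 1) closed (by omega) hc hstop]
          by_cases hP : false ∈ flagsOf rest <;> by_cases hQ : true ∈ flagsOf rest <;>
            simp [hP, hQ] <;> omega
    · rw [if_neg hlen]
      simp only [aopLoop, if_neg hlen]
      exact ih opened closed ho hc hnot

lemma A_iff (clist : List (List Int)) :
    (all_open_or_closed clist = true ↔ ¬(false ∈ flagsOf clist ∧ true ∈ flagsOf clist)) := by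
  have := aopLoop_eq clist 0 0 le_rfl le_rfl (by omega)
  simpa [all_open_or_closed] using this

-- B's all() over qualifying curves equals "every flag equals the reference"
lemma all_flags (tail : List (List Int)) (ref : Bool) :
    (tail.all (fun d =>
        !(decide (d.length > 1)) ||
          (decide (PySem.List.pyGet? d (-1) = PySem.List.pyGet? d 0) == ref)))
      = (flagsOf tail).all (· == ref) := by
  induction tail with
  | nil => simp [flagsOf]
  | cons d rest ih =>
    rw [flagsOf_cons]
    by_cases hd : d.length > 1
    · simp [hd, ih]
    · simp [hd, ih]

lemma all_eqb_iff (F : List Bool) (r : Bool) : ((F.all (· == r)) = true) ↔ ¬((!r) ∈ F) := by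
  simp only [List.all_eq_true]
  constructor
  · intro h hm
    have := h _ hm
    cases r <;> simp at this
  · intro h b hb
    cases r <;> cases b <;> simp_all

lemma B_iff (clist : List (List Int)) :
    (all_open_or_closed_alt clist = true ↔ ¬(false ∈ flagsOf clist ∧ true ∈ flagsOf clist)) := by
  unfold all_open_or_closed_alt
  induction clist with
  | nil => simp [bGo, flagsOf]
  | cons c rest ih =>
    rw [flagsOf_cons]
    by_cases hlen : c.length > 1
    · simp only [bGo, if_pos hlen, all_flags]
      cases hr : decide (PySem.List.pyGet? c (-1) = PySem.List.pyGet? c 0)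
      · rw [all_eqb_iff]; simp
      · rw [all_eqb_iff]; simp
    · simp only [bGo, if_neg hlen]
      exact ih

-- ===== VERDICT (by name: the statement is the Claim_ definition above) =====
theorem all_open_or_closed_spec : Claim_equal_all_open_or_closed := by
  intro clist _
  unfold Spec_all_open_or_closed
  have := (A_iff clist).trans (B_iff clist).symm
  exact Bool.coe_iff_coe.mp this
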